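-- pv_equiv track=rewrite | github.com/Chromega/adventofcode | 2020/Day20/day20.py | FlipAndRotateCoordinate
-- ===== SOURCE A (Python) =====
-- NUM_DIRECTIONS = 4
--
-- def FlipAndRotateCoordinate(pos,size,flip,turns):
--     newX = pos[0]+1
--     newY = pos[1]+1
--
--     while turns < 0:
--         turns += NUM_DIRECTIONS
--
--     if flip:
--         newX = -newX
--
--     for i in range(turns):
--         rotX = -newY
--         rotY = newX
--         newX = rotX
--         newY = rotY
--
--     if newX < 0:
--         newX += size+1
--     if newY < 0:
--         newY += size+1
--
--     return (newX-1, newY-1)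
-- ===== SOURCE B (Python) =====
-- def FlipAndRotateCoordinate(pos, size, flip, turns):
--     t = turns % 4
--     x = -(pos[0] + 1) if flip else pos[0] + 1
--     y = pos[1] + 1
--     if t == 1:
--         x, y = -y, x
--     elif t == 2:
--         x, y = -x, -y
--     elif t == 3:
--         x, y = y, -x
--     if x < 0:
--         x += size + 1
--     if y < 0:
--         y += size + 1
--     return (x - 1, y - 1)
-- ===== Notes on version B (the rewrite author's own statement) =====
-- stated objective: simpler
-- what changed: Replaces the negative-turn while-loop and the repeated 90-degree rotation loop with a single `turns % 4` normalisation and a closed-form four-case selection of the rotated pair.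
import Mathlib
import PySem

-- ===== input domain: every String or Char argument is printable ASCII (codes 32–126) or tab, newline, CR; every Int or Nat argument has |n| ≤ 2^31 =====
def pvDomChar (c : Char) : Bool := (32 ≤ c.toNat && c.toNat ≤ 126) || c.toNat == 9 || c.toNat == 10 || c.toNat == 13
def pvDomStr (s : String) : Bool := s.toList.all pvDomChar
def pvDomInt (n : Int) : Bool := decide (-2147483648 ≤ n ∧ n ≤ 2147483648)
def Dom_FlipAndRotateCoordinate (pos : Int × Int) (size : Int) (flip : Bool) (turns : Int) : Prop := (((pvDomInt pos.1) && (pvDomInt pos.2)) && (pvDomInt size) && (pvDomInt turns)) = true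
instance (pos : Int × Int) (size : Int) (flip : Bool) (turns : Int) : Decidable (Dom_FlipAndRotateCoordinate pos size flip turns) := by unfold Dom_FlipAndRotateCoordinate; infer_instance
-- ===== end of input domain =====

-- B replaces A's negative-turn while-loop and rotation loop by `turns % 4` and a
-- closed-form four-case rotation (objective: simpler, O(1) instead of O(turns)).

-- ===== PORT A =====
-- the `while turns < 0: turns += NUM_DIRECTIONS` loop
def pvNormTurns (turns : Int) : Int :=
  if turns < 0 then pvNormTurns (turns + 4) else turns
termination_by (-turns).toNat
decreasing_by omega

def FlipAndRotateCoordinate (pos : Int × Int) (size : Int) (flip : Bool) (turns : Int) : Int × Int :=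
  let newX := pos.1 + 1
  let newY := pos.2 + 1
  let t := pvNormTurns turns
  let newX := if flip then -newX else newX
  -- for i in range(turns): newX, newY = -newY, newX
  let p := (PySem.List.pyRange 0 t 1).foldl (fun (q : Int × Int) _ => (-q.2, q.1)) (newX, newY)
  let newX := if p.1 < 0 then p.1 + (size + 1) else p.1
  let newY := if p.2 < 0 then p.2 + (size + 1) else p.2
  (newX - 1, newY - 1)

-- ===== PORT B =====
def FlipAndRotateCoordinate_alt (pos : Int × Int) (size : Int) (flip : Bool) (turns : Int) : Int × Int :=
  let t := PySem.Int.mod turns 4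
  let x := if flip then -(pos.1 + 1) else pos.1 + 1
  let y := pos.2 + 1
  let p : Int × Int :=
    if t = 1 then (-y, x)
    else if t = 2 then (-x, -y)
    else if t = 3 then (y, -x)
    else (x, y)
  let x := if p.1 < 0 then p.1 + (size + 1) else p.1
  let y := if p.2 < 0 then p.2 + (size + 1) else p.2
  (x - 1, y - 1)

-- ===== PRECONDITION & SPEC =====
def Spec_FlipAndRotateCoordinate (pos : Int × Int) (size : Int) (flip : Bool) (turns : Int) (out : Int × Int) : Prop := out = FlipAndRotateCoordinate_alt pos size flip turns
instance (pos : Int × Int) (size : Int) (flip : Bool) (turns : Int) (out : Int × Int) : Decidable (Spec_FlipAndRotateCoordinate pos size flip turns out) := by unfold Spec_FlipAndRotateCoordinate; infer_instance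

-- ===== CLAIM (what is proved, stated in full; the proofs are below) =====
def Claim_equal_FlipAndRotateCoordinate : Prop := ∀ (pos : Int × Int) (size : Int) (flip : Bool) (turns : Int), Dom_FlipAndRotateCoordinate pos size flip turns → Spec_FlipAndRotateCoordinate pos size flip turns (FlipAndRotateCoordinate pos size flip turns)

-- ===== LEMMAS AND PROOFS =====

def pvRot (q : Int × Int) : Int × Int := (-q.2, q.1)

theorem pvFoldl_rot (l : List Int) (p : Int × Int) :
    l.foldl (fun (q : Int × Int) _ => (-q.2, q.1)) p = pvRot^[l.length] p := by
  induction l generalizing p with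
  | nil => rfl
  | cons a l ih => simp [List.foldl, ih, Function.iterate_succ_apply, pvRot]

theorem pvRot_four (p : Int × Int) : pvRot^[4] p = p := by
  simp [pvRot, Function.iterate_succ_apply]

theorem pvRot_four_mul (k : Nat) (p : Int × Int) : pvRot^[4 * k] p = p := by
  induction k with
  | zero => rfl
  | succ k ih =>
      have : 4 * (k + 1) = 4 + 4 * k := by omega
      rw [this, Function.iterate_add_apply, ih, pvRot_four]

theorem pvRot_mod (n : Nat) (p : Int × Int) : pvRot^[n] p = pvRot^[n % 4] p := by
  conv_lhs => rw [show n = n % 4 + 4 * (n / 4) by omega]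
  rw [Function.iterate_add_apply, pvRot_four_mul]

theorem pvNormTurns_nonneg_mod (t : Int) :
    0 ≤ pvNormTurns t ∧ pvNormTurns t % 4 = t % 4 := by
  induction t using pvNormTurns.induct with
  | case1 t h ih => rw [pvNormTurns, if_pos h]; omega
  | case2 t h => rw [pvNormTurns, if_neg h]; constructor <;> omega

theorem FlipAndRotateCoordinate_eq_alt (pos : Int × Int) (size : Int) (flip : Bool) (turns : Int) :
    FlipAndRotateCoordinate pos size flip turns = FlipAndRotateCoordinate_alt pos size flip turns := by
  obtain ⟨hnn, hmod⟩ := pvNormTurns_nonneg_mod turns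
  unfold FlipAndRotateCoordinate FlipAndRotateCoordinate_alt
  dsimp only
  rw [pvFoldl_rot, PySem.List.length_pyRange_one, pvRot_mod,
      PySem.Int.mod_eq_emod_of_pos (a := turns) (by norm_num)]
  set n := (pvNormTurns turns - 0).toNat with hn
  have hr4 : n % 4 = 0 ∨ n % 4 = 1 ∨ n % 4 = 2 ∨ n % 4 = 3 := by omega
  rcases hr4 with h | h | h | h
  · have ht : turns % 4 = 0 := by omega
    rw [h, ht]; norm_num
  · have ht : turns % 4 = 1 := by omega
    rw [h, ht]; norm_num [Function.iterate_succ_apply, pvRot]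
  · have ht : turns % 4 = 2 := by omega
    rw [h, ht]; norm_num [Function.iterate_succ_apply, pvRot]
  · have ht : turns % 4 = 3 := by omega
    rw [h, ht]; norm_num [Function.iterate_succ_apply, pvRot]

-- ===== VERDICT (by name: the statement is the Claim_ definition above) =====
theorem FlipAndRotateCoordinate_spec : Claim_equal_FlipAndRotateCoordinate := by
  intro pos size flip turns _
  unfold Spec_FlipAndRotateCoordinate
  exact FlipAndRotateCoordinate_eq_alt pos size flip turns
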